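-- pv_equiv track=rewrite | github.com/rhao5556-beep/peiban | evals/generate_knowmebench_report.py | _suggestions_for_task
-- ===== SOURCE A (Python) =====
-- from collections import defaultdict
-- from typing import Any, Dict, List, Optional, Tuple
--
-- def _safe_str(x: Any) -> str:
--     if x is None:
--         return ""
--     return str(x)
--
-- def _suggestions_for_task(task_type: str, low_score_examples: List[Dict[str, Any]]) -> List[str]:
--     t = (task_type or "").strip()
--     if not t:
--         return []
--
--     base: Dict[str, List[str]] = {
--         "Information Extraction": [
--             "强化实体对齐：回答前先抽取题干中的实体名/属性并逐项对照记录",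
--             "减少“合理补充”：除非有证据，否则不要追加背景细节",
--         ],
--         "Adversarial Abstention": [
--             "加入“可回答性检查”：若记录无证据或题干诱导，优先明确拒答/说明缺失信息",
--             "对含糊问题输出结构化澄清：列出需要的缺失字段并给出无法判断的原因",
--         ],
--         "Temporal Reasoning": [
--             "将时间线显式化：先列出涉及的日期/时间点，再做推理与比较",
--             "检索时扩大时间窗口：避免只取单日导致跨日线索丢失",
--         ],
--         "Logical Event Ordering": [
--             "输出排序依据：每个事件给出同一维度的评分理由（风险/因果/紧急程度）",
--             "避免混用维度：明确是按“危险性/时间先后/重要性”哪一种排序",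
--         ],
--         "Mnestic Trigger Analysis": [
--             "把触发线索与回忆内容一一对应：线索→被激活的记忆片段→理由",
--             "减少泛化心理分析：优先使用记录中的具体线索词/地点/物品",
--         ],
--         "Mind-Body Interaction": [
--             "先复述冲突点（心理 vs 生理）再解释机制，避免直接下结论",
--             "回答保持可证据化：不引入未在记录出现的病史/诊断",
--         ],
--         "Expert-Annotated Psychoanalysis": [
--             "分层解释：行为表象→动机假设→记录证据→不确定性声明",
--             "降低臆测：遇到证据不足时给出多种可能并标注置信度",
--         ],
--     }
--
--     extra: List[str] = []
--     if low_score_examples: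
--         err_counts = defaultdict(int)
--         for ex in low_score_examples:
--             reason = _safe_str(ex.get("reasoning", "")).lower()
--             if "halluc" in reason or "fabricat" in reason:
--                 err_counts["hallucination"] += 1
--             if "missing" in reason or "omit" in reason:
--                 err_counts["missing"] += 1
--             if "incorrect" in reason or "wrong" in reason:
--                 err_counts["incorrect"] += 1
--             if "refus" in reason or "abstain" in reason:
--                 err_counts["abstention"] += 1
--         if err_counts.get("hallucination"):
--             extra.append("加强“证据优先”约束：没有记录证据就不写")
--         if err_counts.get("missing"):
--             extra.append("补齐关键信息：先覆盖参考答案的核心字段再扩展")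
--         if err_counts.get("incorrect"):
--             extra.append("增加自检：输出前对比记录摘录中的实体/时间/地点是否一致")
--
--     return base.get(t, []) + extra
-- ===== SOURCE B (Python) =====
-- from typing import Any, Dict, List
--
-- def _safe_str(x: Any) -> str:
--     if x is None:
--         return ""
--     return str(x)
--
-- _BASE: Dict[str, List[str]] = {
--     "Information Extraction": [
--         "强化实体对齐：回答前先抽取题干中的实体名/属性并逐项对照记录",
--         "减少“合理补充”：除非有证据，否则不要追加背景细节",
--     ],
--     "Adversarial Abstention": [
--         "加入“可回答性检查”：若记录无证据或题干诱导，优先明确拒答/说明缺失信息",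
--         "对含糊问题输出结构化澄清：列出需要的缺失字段并给出无法判断的原因",
--     ],
--     "Temporal Reasoning": [
--         "将时间线显式化：先列出涉及的日期/时间点，再做推理与比较",
--         "检索时扩大时间窗口：避免只取单日导致跨日线索丢失",
--     ],
--     "Logical Event Ordering": [
--         "输出排序依据：每个事件给出同一维度的评分理由（风险/因果/紧急程度）",
--         "避免混用维度：明确是按“危险性/时间先后/重要性”哪一种排序",
--     ],
--     "Mnestic Trigger Analysis": [
--         "把触发线索与回忆内容一一对应：线索→被激活的记忆片段→理由",
--         "减少泛化心理分析：优先使用记录中的具体线索词/地点/物品",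
--     ],
--     "Mind-Body Interaction": [
--         "先复述冲突点（心理 vs 生理）再解释机制，避免直接下结论",
--         "回答保持可证据化：不引入未在记录出现的病史/诊断",
--     ],
--     "Expert-Annotated Psychoanalysis": [
--         "分层解释：行为表象→动机假设→记录证据→不确定性声明",
--         "降低臆测：遇到证据不足时给出多种可能并标注置信度",
--     ],
-- }
--
-- _CHECKS = [
--     (("halluc", "fabricat"), "加强“证据优先”约束：没有记录证据就不写"),
--     (("missing", "omit"), "补齐关键信息：先覆盖参考答案的核心字段再扩展"),
--     (("incorrect", "wrong"), "增加自检：输出前对比记录摘录中的实体/时间/地点是否一致"),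
-- ]
--
-- def _suggestions_for_task(task_type: str, low_score_examples: List[Dict[str, Any]]) -> List[str]:
--     t = (task_type or "").strip()
--     if not t:
--         return []
--     reasons = [_safe_str(ex.get("reasoning", "")).lower() for ex in low_score_examples]
--     extra = [msg for pats, msg in _CHECKS
--              if any(p in r for r in reasons for p in pats)]
--     return _BASE.get(t, []) + extra
-- ===== Notes on version B (the rewrite author's own statement) =====
-- stated objective: simpler
-- what changed: Replaces A's single accumulating defaultdict-counting loop (plus the never-consumed 'abstention' count and the nonempty-list guard) with a lowercased-reasons list comprehension and independent any()-scans driven by a (patterns, message) table.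
import Mathlib
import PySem

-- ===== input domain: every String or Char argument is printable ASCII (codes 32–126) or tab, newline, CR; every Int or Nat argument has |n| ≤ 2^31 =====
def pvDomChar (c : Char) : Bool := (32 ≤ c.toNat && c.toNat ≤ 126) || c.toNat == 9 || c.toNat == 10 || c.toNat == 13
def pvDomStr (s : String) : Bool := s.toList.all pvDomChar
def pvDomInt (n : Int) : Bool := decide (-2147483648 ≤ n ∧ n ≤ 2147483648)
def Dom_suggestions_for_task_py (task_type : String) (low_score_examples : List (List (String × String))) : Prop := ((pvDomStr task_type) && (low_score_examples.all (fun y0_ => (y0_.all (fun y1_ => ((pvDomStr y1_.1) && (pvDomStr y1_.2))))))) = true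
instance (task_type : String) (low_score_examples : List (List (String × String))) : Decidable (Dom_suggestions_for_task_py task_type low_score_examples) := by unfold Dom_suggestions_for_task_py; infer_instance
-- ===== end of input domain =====

-- B re-structures A's counting loop as a lowercased-reason list plus independent any-scans
-- over a (patterns, message) table (objective: simpler; return value only; same dict literal shared as pvBaseTable).

-- the base dict literal (identical text in both Pythons), shared so each port only differs in its algorithm
def pvBaseTable : List (String × List String) :=
  [("Information Extraction",
    ["强化实体对齐：回答前先抽取题干中的实体名/属性并逐项对照记录",
     "减少“合理补充”：除非有证据，否则不要追加背景细节"]),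
   ("Adversarial Abstention",
    ["加入“可回答性检查”：若记录无证据或题干诱导，优先明确拒答/说明缺失信息",
     "对含糊问题输出结构化澄清：列出需要的缺失字段并给出无法判断的原因"]),
   ("Temporal Reasoning",
    ["将时间线显式化：先列出涉及的日期/时间点，再做推理与比较",
     "检索时扩大时间窗口：避免只取单日导致跨日线索丢失"]),
   ("Logical Event Ordering",
    ["输出排序依据：每个事件给出同一维度的评分理由（风险/因果/紧急程度）",
     "避免混用维度：明确是按“危险性/时间先后/重要性”哪一种排序"]),
   ("Mnestic Trigger Analysis",
    ["把触发线索与回忆内容一一对应：线索→被激活的记忆片段→理由",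
     "减少泛化心理分析：优先使用记录中的具体线索词/地点/物品"]),
   ("Mind-Body Interaction",
    ["先复述冲突点（心理 vs 生理）再解释机制，避免直接下结论",
     "回答保持可证据化：不引入未在记录出现的病史/诊断"]),
   ("Expert-Annotated Psychoanalysis",
    ["分层解释：行为表象→动机假设→记录证据→不确定性声明",
     "降低臆测：遇到证据不足时给出多种可能并标注置信度"])]

-- ===== PORT A =====
-- _safe_str on a str value is the identity (None is not representable in the typed input)
def pyStepA (d : PySem.Dict String Int) (ex : List (String × String)) : PySem.Dict String Int :=
  let reason := PySem.Str.lower ((PySem.Dict.mk ex).getD "reasoning" "")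
  let d := if PySem.Str.isIn "halluc" reason || PySem.Str.isIn "fabricat" reason then d.modify "hallucination" 0 (· + 1) else d
  let d := if PySem.Str.isIn "missing" reason || PySem.Str.isIn "omit" reason then d.modify "missing" 0 (· + 1) else d
  let d := if PySem.Str.isIn "incorrect" reason || PySem.Str.isIn "wrong" reason then d.modify "incorrect" 0 (· + 1) else d
  let d := if PySem.Str.isIn "refus" reason || PySem.Str.isIn "abstain" reason then d.modify "abstention" 0 (· + 1) else d
  d

def suggestions_for_task_py (task_type : String) (low_score_examples : List (List (String × String))) : List String :=
  let t := PySem.Str.strip task_type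
  if t = "" then []
  else
    let base : PySem.Dict String (List String) := PySem.Dict.ofList pvBaseTable
    let extra : List String :=
      if low_score_examples ≠ [] then
        let err_counts := low_score_examples.foldl pyStepA PySem.Dict.empty
        (if err_counts.getD "hallucination" 0 ≠ 0 then ["加强“证据优先”约束：没有记录证据就不写"] else []) ++
        (if err_counts.getD "missing" 0 ≠ 0 then ["补齐关键信息：先覆盖参考答案的核心字段再扩展"] else []) ++
        (if err_counts.getD "incorrect" 0 ≠ 0 then ["增加自检：输出前对比记录摘录中的实体/时间/地点是否一致"] else [])
      else []
    base.getD t [] ++ extra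

-- ===== PORT B =====
def pvChecks : List (List String × String) :=
  [(["halluc", "fabricat"], "加强“证据优先”约束：没有记录证据就不写"),
   (["missing", "omit"], "补齐关键信息：先覆盖参考答案的核心字段再扩展"),
   (["incorrect", "wrong"], "增加自检：输出前对比记录摘录中的实体/时间/地点是否一致")]

def suggestions_for_task_py_alt (task_type : String) (low_score_examples : List (List (String × String))) : List String :=
  let t := PySem.Str.strip task_type
  if t = "" then []
  else
    let reasons := low_score_examples.map (fun ex => PySem.Str.lower ((PySem.Dict.mk ex).getD "reasoning" ""))
    let extra := pvChecks.filterMap (fun c =>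
      if reasons.any (fun r => c.1.any (fun p => PySem.Str.isIn p r)) then some c.2 else none)
    (PySem.Dict.ofList pvBaseTable).getD t [] ++ extra

-- ===== PRECONDITION & SPEC =====
def Spec_suggestions_for_task_py (task_type : String) (low_score_examples : List (List (String × String))) (out : List String) : Prop := out = suggestions_for_task_py_alt task_type low_score_examples
instance (task_type : String) (low_score_examples : List (List (String × String))) (out : List String) : Decidable (Spec_suggestions_for_task_py task_type low_score_examples out) := by unfold Spec_suggestions_for_task_py; infer_instance

-- ===== CLAIM (what is proved, stated in full; the proofs are below) =====
def Claim_equal_suggestions_for_task_py : Prop := ∀ (task_type : String) (low_score_examples : List (List (String × String))), Dom_suggestions_for_task_py task_type low_score_examples → Spec_suggestions_for_task_py task_type low_score_examples (suggestions_for_task_py task_type low_score_examples)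

-- ===== LEMMAS AND PROOFS =====
def pvReason (ex : List (String × String)) : String :=
  PySem.Str.lower ((PySem.Dict.mk ex).getD "reasoning" "")

def pvHitH (ex : List (String × String)) : Bool :=
  PySem.Str.isIn "halluc" (pvReason ex) || PySem.Str.isIn "fabricat" (pvReason ex)
def pvHitM (ex : List (String × String)) : Bool :=
  PySem.Str.isIn "missing" (pvReason ex) || PySem.Str.isIn "omit" (pvReason ex)
def pvHitI (ex : List (String × String)) : Bool :=
  PySem.Str.isIn "incorrect" (pvReason ex) || PySem.Str.isIn "wrong" (pvReason ex)

theorem pvFoldCount (l : List (List (String × String))) (d : PySem.Dict String Int) :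
    (l.foldl pyStepA d).getD "hallucination" 0 = d.getD "hallucination" 0 + (l.countP pvHitH) ∧
    (l.foldl pyStepA d).getD "missing" 0 = d.getD "missing" 0 + (l.countP pvHitM) ∧
    (l.foldl pyStepA d).getD "incorrect" 0 = d.getD "incorrect" 0 + (l.countP pvHitI) := by
  induction l generalizing d with
  | nil => simp
  | cons ex rest ih =>
    obtain ⟨h1, h2, h3⟩ := ih (pyStepA d ex)
    simp only [List.foldl_cons, List.countP_cons, h1, h2, h3]
    refine ⟨?_, ?_, ?_⟩ <;>
    · simp only [pyStepA, pvHitH, pvHitM, pvHitI, pvReason]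
      split_ifs <;>
        simp_all [PySem.Dict.getD_modify] <;> omega

theorem pvCountNe (l : List (List (String × String))) (p : List (String × String) → Bool) :
    ((l.countP p : Int) ≠ 0) = (l.any p = true) := by
  have : (0 < l.countP p) ↔ ∃ x ∈ l, p x := List.countP_pos_iff
  rw [List.any_eq_true]
  refine propext ⟨fun h => this.mp (Nat.pos_of_ne_zero (by exact_mod_cast h)), fun h => ?_⟩
  have := this.mpr h
  exact_mod_cast this.ne'

-- ===== VERDICT (by name: the statement is the Claim_ definition above) =====
theorem suggestions_for_task_py_spec : Claim_equal_suggestions_for_task_py := by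
  intro task_type lse _
  unfold Spec_suggestions_for_task_py suggestions_for_task_py suggestions_for_task_py_alt
  by_cases ht : PySem.Str.strip task_type = ""
  · simp [ht]
  · simp only [ht, if_false]
    congr 1
    have hmap : ∀ (p : String → Bool),
        ((lse.map (fun ex => PySem.Str.lower ((PySem.Dict.mk ex).getD "reasoning" ""))).any p)
          = lse.any (fun ex => p (pvReason ex)) := by
      intro p; rw [List.any_map]; rfl
    cases lse with
    | nil => simp
    | cons e rest =>
      obtain ⟨h1, h2, h3⟩ := pvFoldCount (e :: rest) PySem.Dict.empty
      simp only [PySem.Dict.getD_empty, zero_add] at h1 h2 h3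
      rw [if_pos (by simp : (e :: rest : List (List (String × String))) ≠ [])]
      rw [h1, h2, h3]
      simp only [pvCountNe]
      simp only [pvChecks, List.filterMap_cons, List.filterMap_nil]
      rw [hmap, hmap, hmap]
      have e1 : (fun ex => List.any ["halluc", "fabricat"] (fun p => PySem.Str.isIn p (pvReason ex))) = pvHitH := by
        funext x; simp [pvHitH]
      have e2 : (fun ex => List.any ["missing", "omit"] (fun p => PySem.Str.isIn p (pvReason ex))) = pvHitM := by
        funext x; simp [pvHitM]
      have e3 : (fun ex => List.any ["incorrect", "wrong"] (fun p => PySem.Str.isIn p (pvReason ex))) = pvHitI := by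
        funext x; simp [pvHitI]
      rw [e1, e2, e3]
      split_ifs <;> simp
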